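-- pv_equiv track=rewrite | github.com/stefanholek/kmd | kmd/quoting.py | char_is_backslash_quoted
-- ===== SOURCE A (Python) =====
-- def char_is_backslash_quoted(text, index):
--     """Return True if the character at ``index`` is backslash-quoted."""
--     skip_next = False
--     for i in range(index):
--         c = text[i]
--         if skip_next:
--             skip_next = False
--         elif c == '\\':
--             skip_next = True
--             if i == index-1:
--                 return True
--     return False
-- ===== SOURCE B (Python) =====
-- def char_is_backslash_quoted(text, index):
--     """Return True if the character at ``index`` is backslash-quoted."""
--     if index <= 0:
--         return False
--     count = 0
--     i = index - 1
--     while i >= 0 and text[i] == '\\':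
--         count += 1
--         i -= 1
--     return count % 2 == 1
-- ===== Notes on version B (the rewrite author's own statement) =====
-- stated objective: faster
-- what changed: Replaces A's forward scan over the whole prefix with a skip_next toggle by a backward walk from index-1 that counts the consecutive backslashes immediately before index and returns whether that run length is odd.
import Mathlib
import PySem

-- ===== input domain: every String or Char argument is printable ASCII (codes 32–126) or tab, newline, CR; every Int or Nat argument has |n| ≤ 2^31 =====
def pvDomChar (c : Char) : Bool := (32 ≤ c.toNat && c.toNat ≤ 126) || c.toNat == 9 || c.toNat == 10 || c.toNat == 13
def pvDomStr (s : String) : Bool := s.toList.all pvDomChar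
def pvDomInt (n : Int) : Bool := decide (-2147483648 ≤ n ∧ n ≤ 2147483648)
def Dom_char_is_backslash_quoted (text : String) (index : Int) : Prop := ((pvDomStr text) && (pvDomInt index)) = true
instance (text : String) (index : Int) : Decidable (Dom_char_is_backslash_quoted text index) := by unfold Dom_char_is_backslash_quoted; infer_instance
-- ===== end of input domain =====

-- B replaces A's forward skip-toggle scan over the whole prefix by a backward walk that
-- counts the backslash run immediately before `index` and tests its parity (objective: simpler).

-- ===== PORT A =====
-- A's for-loop over range(index) with the skip_next flag and the early `return True`.
-- text[i] is ported as pyGet?; the `none` (IndexError) case is excluded by Pre_.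
def pvLoopA (cs : List Char) (index : Int) : List Int → Bool → Bool
  | [], _ => false
  | i :: rest, skip =>
    if skip then pvLoopA cs index rest false
    else if PySem.List.pyGet? cs i = some '\\' then
      if i = index - 1 then true else pvLoopA cs index rest true
    else pvLoopA cs index rest skip

def char_is_backslash_quoted (text : String) (index : Int) : Bool :=
  pvLoopA text.toList index (PySem.List.pyRange 0 index 1) false

-- ===== PORT B =====
-- B's while-loop: walk down from j = index-1 while text[j] == '\\', counting the run.
def pvRunB (cs : List Char) : Nat → Nat
  | 0 => if PySem.List.pyGet? cs 0 = some '\\' then 1 else 0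
  | j + 1 => if PySem.List.pyGet? cs ((j : Int) + 1) = some '\\' then pvRunB cs j + 1 else 0

def char_is_backslash_quoted_alt (text : String) (index : Int) : Bool :=
  if index ≤ 0 then false
  else pvRunB text.toList (index - 1).toNat % 2 == 1

-- ===== PRECONDITION & SPEC =====
-- Excludes exactly the inputs where Python A raises IndexError (and Python B does too):
-- reading text[index-1] with index > len(text).
def Pre_char_is_backslash_quoted (text : String) (index : Int) : Prop :=
  index ≤ (text.toList.length : Int)
instance (text : String) (index : Int) : Decidable (Pre_char_is_backslash_quoted text index) := by
  unfold Pre_char_is_backslash_quoted; infer_instance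

def pvWitness_char_is_backslash_quoted : String × Int := ("a\\b", 2)

def Spec_char_is_backslash_quoted (text : String) (index : Int) (out : Bool) : Prop := out = char_is_backslash_quoted_alt text index
instance (text : String) (index : Int) (out : Bool) : Decidable (Spec_char_is_backslash_quoted text index out) := by unfold Spec_char_is_backslash_quoted; infer_instance

-- ===== CLAIM (what is proved, stated in full; the proofs are below) =====
def Claim_equal_char_is_backslash_quoted : Prop := ∀ (text : String) (index : Int), Dom_char_is_backslash_quoted text index → Pre_char_is_backslash_quoted text index → Spec_char_is_backslash_quoted text index (char_is_backslash_quoted text index)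

-- ===== LEMMAS AND PROOFS =====

-- Length (possibly 0) of the backslash run ending at position a-1; pvRunB shifted by one.
def pvRunAt (cs : List Char) : Nat → Nat
  | 0 => 0
  | j + 1 => pvRunB cs j

lemma pvRunB_succ_eq (cs : List Char) (j : Nat) :
    pvRunB cs j = if PySem.List.pyGet? cs (j : Int) = some '\\' then pvRunAt cs j + 1 else 0 := by
  cases j with
  | zero => simp [pvRunB, pvRunAt]
  | succ k =>
    rw [show ((k + 1 : Nat) : Int) = (k : Int) + 1 by push_cast; ring]
    simp [pvRunB, pvRunAt]

-- Loop invariant: starting the scan at position a with skip = Odd(run ending at a-1)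
-- yields "a < m and the run ending at m-1 is odd".
lemma pvLoopA_inv (cs : List Char) (m : Nat) :
    ∀ (k a : Nat), a + k = m →
      pvLoopA cs (m : Int) (PySem.List.pyRange (a : Int) (m : Int) 1) (pvRunAt cs a % 2 == 1)
        = (decide (a < m) && (pvRunAt cs m % 2 == 1)) := by
  intro k
  induction k with
  | zero =>
    intro a ha
    subst ha
    rw [PySem.List.pyRange_one_eq_nil (by omega)]
    simp [pvLoopA]
  | succ k ih =>
    intro a ha
    have halt : a < m := by omega
    rw [PySem.List.pyRange_one_cons (by exact_mod_cast halt)]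
    rw [show ((a : Int) + 1) = ((a + 1 : Nat) : Int) by push_cast; ring]
    -- continuation with skip = false and an even run ending at a
    have hcont0 : pvRunAt cs (a + 1) % 2 = 0 →
        pvLoopA cs (m : Int) (PySem.List.pyRange ((a + 1 : Nat) : Int) (m : Int) 1) false
          = (decide (a < m) && (pvRunAt cs m % 2 == 1)) := by
      intro hb
      rcases Nat.lt_or_ge (a + 1) m with hlt | hge
      · have hrec := ih (a + 1) (by omega)
        have hf : (pvRunAt cs (a + 1) % 2 == 1) = false := by simp [hb]
        rw [hf] at hrec
        rw [hrec]
        simp [halt, hlt]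
      · have ham : a + 1 = m := by omega
        rw [PySem.List.pyRange_one_eq_nil (by exact_mod_cast ham.ge)]
        simp [pvLoopA, ← ham, hb]
    by_cases hs : pvRunAt cs a % 2 = 1
    · -- skip = true: run ending at a-1 odd ⇒ run ending at a even
      have hb : pvRunAt cs (a + 1) % 2 = 0 := by
        show pvRunB cs a % 2 = 0
        rw [pvRunB_succ_eq]
        split <;> omega
      simp only [pvLoopA, hs, beq_iff_eq]
      exact hcont0 hb
    · have hs0 : pvRunAt cs a % 2 = 0 := by omega
      have hf : (pvRunAt cs a % 2 == 1) = false := by simp [hs0]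
      rw [hf]
      simp only [pvLoopA, Bool.false_eq_true, if_false]
      by_cases hc : PySem.List.pyGet? cs (a : Int) = some '\\'
      · have hb : pvRunAt cs (a + 1) % 2 = 1 := by
          show pvRunB cs a % 2 = 1
          rw [pvRunB_succ_eq, if_pos hc]
          omega
        rw [if_pos hc]
        by_cases hlast : (a : Int) = (m : Int) - 1
        · have ham : a + 1 = m := by omega
          rw [if_pos hlast]
          rw [ham] at hb
          simp [halt, hb]
        · rw [if_neg hlast]
          have hlt : a + 1 < m := by omega
          have hrec := ih (a + 1) (by omega)
          have ht : (pvRunAt cs (a + 1) % 2 == 1) = true := by simp [hb]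
          rw [ht] at hrec
          rw [hrec]
          simp [halt, hlt]
      · rw [if_neg hc]
        have hb : pvRunAt cs (a + 1) % 2 = 0 := by
          show pvRunB cs a % 2 = 0
          rw [pvRunB_succ_eq, if_neg hc]
        exact hcont0 hb

-- ===== VERDICT (by name: the statement is the Claim_ definition above) =====
theorem char_is_backslash_quoted_spec : Claim_equal_char_is_backslash_quoted := by
  intro text index _ _
  unfold Spec_char_is_backslash_quoted char_is_backslash_quoted char_is_backslash_quoted_alt
  by_cases h0 : index ≤ 0
  · rw [PySem.List.pyRange_one_eq_nil h0]
    simp [pvLoopA, h0]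
  · rw [if_neg h0]
    have hm : index = ((index.toNat : Nat) : Int) := by omega
    have hpos : 0 < index.toNat := by omega
    have key := pvLoopA_inv text.toList index.toNat index.toNat 0 (by omega)
    have h00 : (pvRunAt text.toList 0 % 2 == 1) = false := by simp [pvRunAt]
    rw [h00] at key
    simp only [Nat.cast_zero] at key
    rw [hm, key]
    have hj : (((index.toNat : Nat) : Int) - 1).toNat = index.toNat - 1 := by omega
    rw [hj]
    have hr : pvRunAt text.toList index.toNat = pvRunB text.toList (index.toNat - 1) := by
      cases hn : index.toNat with
      | zero => omega
      | succ j => simp [pvRunAt]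
    rw [hr]
    simp [hpos]
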